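-- pv_equiv track=rewrite | github.com/rhelmstedter/pybites | uppercase-vowels/script.py | uppercase_vowels
-- ===== SOURCE A (Python) =====
-- import string
--
-- VOWELS = "aeiou"
--
-- EXTENSIONS = [".mp3", ".jpg", ".jpeg", ".pdf", ".txt", ".mp4", ".png", ".exe"]
--
-- def uppercase_vowels(text: str) -> str:
--     suffix = ""
--     if text[-4:] in EXTENSIONS:
--         suffix = text[-4:]
--         text = text[:-4]
--     elif text[-5:] in EXTENSIONS:
--         suffix = text[-5:]
--         text = text[:-5]
--     for c in string.punctuation:
--         text = text.replace(c, " ")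
--     text = text.lower().replace(".", " ")
--     return "".join([c.upper() if c in VOWELS else c for c in text]) + suffix
-- ===== SOURCE B (Python) =====
-- import string
--
-- VOWELS = "aeiou"
--
-- EXTENSIONS = [".mp3", ".jpg", ".jpeg", ".pdf", ".txt", ".mp4", ".png", ".exe"]
--
-- def _map_char(c):
--     if c in string.punctuation:
--         return " "
--     if c in VOWELS:
--         return c.upper()
--     return c
--
-- def uppercase_vowels(text: str) -> str:
--     for ext in EXTENSIONS:
--         if text.endswith(ext):
--             return "".join(map(_map_char, text[:-len(ext)].lower())) + ext
--     return "".join(map(_map_char, text.lower()))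
-- ===== Notes on version B (the rewrite author's own statement) =====
-- stated objective: simpler
-- what changed: B replaces A's slice-and-membership extension test by a first-match endswith scan over EXTENSIONS, and fuses A's 32-iteration punctuation replace loop, the dot-replace and the vowel comprehension into one mapped pass with a per-character classifier over the lowered body.
import Mathlib
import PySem

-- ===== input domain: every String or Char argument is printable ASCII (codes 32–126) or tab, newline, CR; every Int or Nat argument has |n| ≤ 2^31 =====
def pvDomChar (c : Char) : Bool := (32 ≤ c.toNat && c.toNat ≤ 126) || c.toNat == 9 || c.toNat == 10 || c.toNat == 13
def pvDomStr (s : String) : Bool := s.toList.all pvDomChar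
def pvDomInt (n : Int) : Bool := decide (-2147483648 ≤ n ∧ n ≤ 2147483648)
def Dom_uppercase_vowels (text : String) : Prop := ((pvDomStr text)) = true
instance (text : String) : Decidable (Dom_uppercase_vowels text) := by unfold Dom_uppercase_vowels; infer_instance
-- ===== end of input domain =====

-- B replaces A's slice-based extension test and its staged replace/lower/comprehension passes
-- by a first-match endswith scan over EXTENSIONS and one mapped pass with a per-character
-- classifier over the lowered body (objective: simpler, a single traversal).

-- shared module-level constants of the Python file
def VOWELS : String := "aeiou"
def EXTENSIONS : List String := [".mp3", ".jpg", ".jpeg", ".pdf", ".txt", ".mp4", ".png", ".exe"]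
-- string.punctuation
def PUNCTUATION : String := "!\"#$%&'()*+,-./:;<=>?@[\\]^_`{|}~"

-- ===== PORT A =====
def uppercase_vowels (text : String) : String :=
  match (if EXTENSIONS.contains (PySem.Str.slice text (some (-4)) none) then
           (PySem.Str.slice text (some (-4)) none, PySem.Str.slice text none (some (-4)))
         else if EXTENSIONS.contains (PySem.Str.slice text (some (-5)) none) then
           (PySem.Str.slice text (some (-5)) none, PySem.Str.slice text none (some (-5)))
         else ("", text)) with
  | (suffix, body) =>
    -- for c in string.punctuation: text = text.replace(c, " ")
    let t1 : String := PUNCTUATION.toList.foldl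
      (fun t ch => PySem.Str.replace t (String.ofList [ch]) " ") body
    -- text = text.lower().replace(".", " ")
    let t2 : String := PySem.Str.replace (PySem.Str.lower t1) "." " "
    -- "".join([c.upper() if c in VOWELS else c for c in text]) + suffix
    PySem.Str.join "" (t2.toList.map (fun ch =>
      if PySem.Str.isIn (String.ofList [ch]) VOWELS then PySem.Str.upper (String.ofList [ch])
      else String.ofList [ch])) ++ suffix

-- ===== PORT B =====
-- _map_char takes and returns one-character strings in Python; it is ported at the Char
-- level (membership test and upperChar), which is exact on the ASCII domain Dom_.
def map_char (c : Char) : Char :=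
  if PUNCTUATION.toList.contains c then ' '
  else if VOWELS.toList.contains c then PySem.Chars.upperChar c
  else c

def uppercase_vowels_alt (text : String) : String :=
  -- for ext in EXTENSIONS: if text.endswith(ext): return join(map(...)) + ext
  match EXTENSIONS.find? (fun ext => PySem.Str.endswith text ext) with
  | some ext =>
      String.ofList ((PySem.Str.lower
        (PySem.Str.slice text none (some (-(PySem.Str.len ext : Int))))).toList.map map_char) ++ ext
  | none => String.ofList ((PySem.Str.lower text).toList.map map_char)

-- ===== PRECONDITION & SPEC =====
def Spec_uppercase_vowels (text : String) (out : String) : Prop := out = uppercase_vowels_alt text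
instance (text : String) (out : String) : Decidable (Spec_uppercase_vowels text out) := by unfold Spec_uppercase_vowels; infer_instance

-- ===== CLAIM (what is proved, stated in full; the proofs are below) =====
def Claim_equal_uppercase_vowels : Prop := ∀ (text : String), Dom_uppercase_vowels text → Spec_uppercase_vowels text (uppercase_vowels text)

-- ===== LEMMAS AND PROOFS =====

-- strings are determined by their character lists
lemma str_toList_inj (s t : String) (h : s.toList = t.toList) : s = t := by
  have := congrArg String.ofList h
  simpa using this

-- the characters of string.punctuation, as a plain list literal (for cheap `decide`s)
def punctChars : List Char :=
  ['!','"','#','$','%','&','\'','(',')','*','+',',','-','.','/',':',';','<','=','>','?','@','[','\\',']','^','_','`','{','|','}','~']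

lemma punctList : PUNCTUATION.toList = punctChars := by decide

lemma punct_not_upper : ∀ x ∈ punctChars, PySem.Chars.isupper x = false := by
  have h : punctChars.all (fun x => !PySem.Chars.isupper x) = true := by decide
  intro x hx
  simpa using List.all_eq_true.mp h x hx

lemma punct_not_lower_range : ∀ x ∈ punctChars, ¬ (97 ≤ x.toNat ∧ x.toNat ≤ 122) := by
  have h : punctChars.all (fun x => decide (¬ (97 ≤ x.toNat ∧ x.toNat ≤ 122))) = true := by decide
  intro x hx
  have hx2 := List.all_eq_true.mp h x hx
  simp at hx2
  omega

-- replacing a single-char pattern by a single char is a pointwise map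
lemma go_single (c r : Char) : ∀ (fuel : Nat) (l acc : List Char), l.length ≤ fuel →
    PySem.Chars.replace.go [c] [r] fuel l acc =
      acc.reverse ++ l.map (fun x => if x = c then r else x) := by
  intro fuel
  induction fuel with
  | zero =>
    intro l acc h
    have hl : l = [] := by cases l with
      | nil => rfl
      | cons a t => simp at h
    subst hl
    simp [PySem.Chars.replace.go]
  | succ n ih =>
    intro l acc h
    cases l with
    | nil => simp [PySem.Chars.replace.go]
    | cons a t =>
      by_cases hac : c = a
      · subst hac
        have hpre : List.isPrefixOf [c] (c :: t) = true := by simp [List.isPrefixOf]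
        simp only [PySem.Chars.replace.go, hpre, if_true, List.length_cons] at *
        have hdrop : List.drop (([] : List Char).length + 1) (c :: t) = t := by simp
        have hrev : [r].reverse ++ acc = r :: acc := by simp
        rw [hdrop, hrev, ih t (r :: acc) (by omega)]
        simp
      · have hpre : List.isPrefixOf [c] (a :: t) = false := by
          simp [List.isPrefixOf]
          exact hac
        simp only [PySem.Chars.replace.go, hpre, Bool.false_eq_true, if_false,
          List.length_cons] at *
        rw [ih t (a :: acc) (by omega)]
        simp [Ne.symm hac]

lemma replace_single (s : List Char) (c r : Char) :
    PySem.Chars.replace s [c] [r] = s.map (fun x => if x = c then r else x) := by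
  simp only [PySem.Chars.replace, List.isEmpty_cons, Bool.false_eq_true, if_false]
  rw [go_single c r s.length s [] le_rfl]
  simp

lemma foldl_replace_toList (ps : List Char) (s : String) :
    (ps.foldl (fun t ch => PySem.Str.replace t (String.ofList [ch]) " ") s).toList
      = ps.foldl (fun l ch => l.map (fun x => if x = ch then ' ' else x)) s.toList := by
  induction ps generalizing s with
  | nil => rfl
  | cons p ps ih =>
    simp only [List.foldl_cons]
    rw [ih, PySem.Str.toList_replace, String.toList_ofList]
    have hsp : (" " : String).toList = [' '] := by decide
    rw [hsp, replace_single]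

lemma foldl_map_swap (ps : List Char) (hsp : ' ' ∉ ps) : ∀ (l : List Char),
    ps.foldl (fun l ch => l.map (fun x => if x = ch then ' ' else x)) l
      = l.map (fun x => if x ∈ ps then ' ' else x) := by
  induction ps with
  | nil => intro l; simp
  | cons p ps ih =>
    intro l
    have hsp' : ' ' ∉ ps := fun h => hsp (List.mem_cons_of_mem _ h)
    simp only [List.foldl_cons]
    rw [ih hsp', List.map_map]
    apply List.map_congr_left
    intro x _
    by_cases hxp : x = p
    · subst hxp
      simp [hsp', List.mem_cons]
    · simp [Function.comp, hxp, List.mem_cons]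

lemma isIn_single (ch : Char) (s : String) :
    PySem.Str.isIn (String.ofList [ch]) s = decide (ch ∈ s.toList) := by
  rw [Bool.eq_iff_iff, decide_eq_true_iff]
  rw [show PySem.Str.isIn (String.ofList [ch]) s = PySem.Chars.isIn [ch] s.toList from by
    simp [PySem.Str.isIn]]
  rw [PySem.Chars.isIn_iff_infix]
  exact List.singleton_infix_iff ch s.toList

lemma lowerChar_of_not_upper (c : Char) (h : PySem.Chars.isupper c = false) :
    PySem.Chars.lowerChar c = c := by
  simp [PySem.Chars.lowerChar, h]

lemma lowerChar_bounds (c : Char) (h : PySem.Chars.isupper c = true) :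
    97 ≤ (PySem.Chars.lowerChar c).toNat ∧ (PySem.Chars.lowerChar c).toNat ≤ 122 := by
  have hc : 65 ≤ c.toNat ∧ c.toNat ≤ 90 := by
    simp only [PySem.Chars.isupper, Bool.and_eq_true, decide_eq_true_eq, Char.le_def,
      UInt32.le_iff_toNat_le] at h
    exact h
  simp only [PySem.Chars.lowerChar, h, if_true]
  rw [Char.toNat_ofNat]
  rw [if_pos (by unfold Nat.isValidChar; omega)]
  omega

-- per-character: A's chain of passes, restricted to one character, produces exactly
-- the singleton [map_char (lowerChar c)]
set_option maxRecDepth 4096 in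
lemma charwise (c : Char) :
    ((fun ch => if PySem.Str.isIn (String.ofList [ch]) VOWELS then PySem.Str.upper (String.ofList [ch])
                else String.ofList [ch])
      ((fun x => if x = '.' then ' ' else x)
        (PySem.Chars.lowerChar (if c ∈ PUNCTUATION.toList then ' ' else c)))).toList
    = [map_char (PySem.Chars.lowerChar c)] := by
  by_cases hp : c ∈ PUNCTUATION.toList
  · have hu : PySem.Chars.isupper c = false := punct_not_upper c (punctList ▸ hp)
    rw [if_pos hp, lowerChar_of_not_upper c hu]
    rw [show map_char c = ' ' from by simp [map_char, List.contains_iff_mem, hp]]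
    decide
  · rw [if_neg hp]
    beta_reduce
    have hnp : PySem.Chars.lowerChar c ∉ PUNCTUATION.toList := by
      by_cases hu : PySem.Chars.isupper c = true
      · obtain ⟨h1, h2⟩ := lowerChar_bounds c hu
        intro hmem
        exact punct_not_lower_range _ (punctList ▸ hmem) ⟨h1, h2⟩
      · have hu' : PySem.Chars.isupper c = false := by
          cases h : PySem.Chars.isupper c
          · rfl
          · exact absurd h hu
        rw [lowerChar_of_not_upper c hu']
        exact hp
    have hdot : PySem.Chars.lowerChar c ≠ '.' := by
      intro h
      exact hnp (h ▸ (punctList ▸ (by decide : ('.' : Char) ∈ punctChars)))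
    rw [if_neg hdot]
    rw [show map_char (PySem.Chars.lowerChar c)
        = (if VOWELS.toList.contains (PySem.Chars.lowerChar c) then
            PySem.Chars.upperChar (PySem.Chars.lowerChar c) else PySem.Chars.lowerChar c) from by
      simp [map_char, List.contains_iff_mem, hnp]]
    by_cases hv : PySem.Chars.lowerChar c ∈ VOWELS.toList
    · rw [if_pos (show PySem.Str.isIn (String.ofList [PySem.Chars.lowerChar c]) VOWELS = true from by
        rw [isIn_single]; simp [hv])]
      rw [if_pos (show VOWELS.toList.contains (PySem.Chars.lowerChar c) = true from by
        simp [List.contains_iff_mem, hv])]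
      simp [PySem.Str.upper, PySem.Chars.upper]
    · rw [if_neg (show ¬ PySem.Str.isIn (String.ofList [PySem.Chars.lowerChar c]) VOWELS = true from by
        rw [isIn_single]; simp [hv])]
      rw [if_neg (show ¬ VOWELS.toList.contains (PySem.Chars.lowerChar c) = true from by
        simp [List.contains_iff_mem, hv])]
      simp

-- A's staged passes, fused: the nested maps produce the singleton lists of B's classifier
lemma step_maps : ∀ (l : List Char),
    List.map String.toList (List.map
      (fun ch => if PySem.Str.isIn (String.ofList [ch]) VOWELS then PySem.Str.upper (String.ofList [ch])
                 else String.ofList [ch])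
      (List.map (fun x => if x = '.' then ' ' else x)
        (List.map PySem.Chars.lowerChar
          (List.map (fun x => if x ∈ PUNCTUATION.toList then ' ' else x) l))))
    = List.map (fun c => [map_char (PySem.Chars.lowerChar c)]) l := by
  intro l
  induction l with
  | nil => rfl
  | cons c t ih =>
    simp only [List.map_cons]
    rw [ih]
    exact congrArg₂ List.cons (charwise c) rfl

-- A's whole post-suffix pipeline equals B's single mapped pass, for any body string
set_option maxRecDepth 4096 in
set_option maxHeartbeats 1000000 in
lemma bodyEq (s : String) :
    PySem.Str.join "" ((PySem.Str.replace
        (PySem.Str.lower (PUNCTUATION.toList.foldl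
          (fun t ch => PySem.Str.replace t (String.ofList [ch]) " ") s)) "." " ").toList.map
      (fun ch => if PySem.Str.isIn (String.ofList [ch]) VOWELS then PySem.Str.upper (String.ofList [ch])
                 else String.ofList [ch]))
    = String.ofList ((PySem.Str.lower s).toList.map map_char) := by
  apply str_toList_inj
  rw [PySem.Str.toList_join, String.toList_ofList]
  rw [PySem.Str.toList_replace, PySem.Str.toList_lower, foldl_replace_toList,
    foldl_map_swap PUNCTUATION.toList (by rw [punctList]; decide), PySem.Str.toList_lower]
  rw [show (("." : String)).toList = ['.'] from by decide,
    show ((" " : String)).toList = [' '] from by decide, replace_single]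
  simp only [PySem.Chars.lower]
  rw [step_maps s.toList]
  rw [show (fun c => [map_char (PySem.Chars.lowerChar c)])
      = (fun a => [a]) ∘ (fun c => map_char (PySem.Chars.lowerChar c)) from rfl]
  rw [← List.map_map]
  rw [PySem.Chars.join_nil_singletons, String.toList_ofList, List.map_map]
  rfl

-- ===== suffix-detection lemmas =====

lemma ext_len : ∀ e ∈ EXTENSIONS, e.toList.length = 4 ∨ e.toList.length = 5 := by decide

lemma ext_unique : ∀ e1 ∈ EXTENSIONS, ∀ e2 ∈ EXTENSIONS, e1.toList <:+ e2.toList → e1 = e2 := by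
  decide

lemma unique_suffix (L : List Char) (e1 e2 : String) (h1 : e1 ∈ EXTENSIONS)
    (h2 : e2 ∈ EXTENSIONS) (s1 : e1.toList <:+ L) (s2 : e2.toList <:+ L) : e1 = e2 := by
  rcases List.suffix_or_suffix_of_suffix s1 s2 with h | h
  · exact ext_unique e1 h1 e2 h2 h
  · exact (ext_unique e2 h2 e1 h1 h).symm

lemma find_unique {α : Type} (p : α → Bool) (l : List α) (e : α) (he : e ∈ l)
    (hpe : p e = true) (hu : ∀ x ∈ l, p x = true → x = e) : l.find? p = some e := by
  induction l with
  | nil => cases he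
  | cons a t ih =>
    by_cases hpa : p a = true
    · have hae : a = e := hu a (List.mem_cons_self) hpa
      simp [hae, hpe]
    · have het : e ∈ t := by
        rcases List.mem_cons.mp he with h | h
        · exact absurd (h ▸ hpe) hpa
        · exact h
      simp only [List.find?_cons, hpa]
      simp only [Bool.false_eq_true, if_false] at *
      exact ih het (fun x hx hpx => hu x (List.mem_cons_of_mem _ hx) hpx)

lemma slice4_toList (text : String) :
    (PySem.Str.slice text (some (-4)) none).toList
      = text.toList.drop (text.toList.length - 4) := by
  rw [PySem.Str.toList_slice, PySem.Chars.slice_eq_listSlice,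
    PySem.List.slice_from_neg_ofNat _ 4 (by omega)]

lemma slice5_toList (text : String) :
    (PySem.Str.slice text (some (-5)) none).toList
      = text.toList.drop (text.toList.length - 5) := by
  rw [PySem.Str.toList_slice, PySem.Chars.slice_eq_listSlice,
    PySem.List.slice_from_neg_ofNat _ 5 (by omega)]

lemma suffix_drop (L e : List Char) (hs : e <:+ L) : L.drop (L.length - e.length) = e := by
  obtain ⟨t, rfl⟩ := hs
  have : (t ++ e).length - e.length = t.length := by simp
  rw [this, List.drop_left]

lemma endswith_iff (text e : String) :
    PySem.Str.endswith text e = true ↔ e.toList <:+ text.toList := by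
  simp [PySem.Chars.endswith_iff]

lemma str_len_eq (s : String) : PySem.Str.len s = (s.toList.length : Int) := by
  simp [PySem.Str.len_eq]

-- ===== VERDICT (by name: the statement is the Claim_ definition above) =====
set_option maxRecDepth 4096 in
set_option maxHeartbeats 2000000 in
theorem uppercase_vowels_spec : Claim_equal_uppercase_vowels := by
  unfold Claim_equal_uppercase_vowels
  intro text _
  unfold Spec_uppercase_vowels
  by_cases h4 : EXTENSIONS.contains (PySem.Str.slice text (some (-4)) none) = true
  · -- A strips a 4-character extension; B's endswith scan finds the same one
    have hmem : (PySem.Str.slice text (some (-4)) none) ∈ EXTENSIONS := by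
      simpa [List.contains_iff_mem] using h4
    have hsuf : (PySem.Str.slice text (some (-4)) none).toList <:+ text.toList := by
      rw [slice4_toList]; exact List.drop_suffix _ _
    have hlen : (PySem.Str.slice text (some (-4)) none).toList.length
        = text.toList.length - (text.toList.length - 4) := by
      rw [slice4_toList, List.length_drop]
    have hl4 : (PySem.Str.slice text (some (-4)) none).toList.length = 4 := by
      rcases ext_len _ hmem with h | h <;> omega
    have hfind : EXTENSIONS.find? (fun ext => PySem.Str.endswith text ext)
        = some (PySem.Str.slice text (some (-4)) none) := by
      apply find_unique _ _ _ hmem ((endswith_iff text _).mpr hsuf)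
      intro x hx hpx
      exact unique_suffix text.toList x _ hx hmem ((endswith_iff text x).mp hpx) hsuf
    have hlenE : (PySem.Str.len (PySem.Str.slice text (some (-4)) none)) = (4 : Int) := by
      rw [str_len_eq, hl4]; rfl
    unfold uppercase_vowels uppercase_vowels_alt
    rw [if_pos h4, hfind]
    dsimp only
    rw [hlenE]
    exact congrArg (· ++ PySem.Str.slice text (some (-4)) none)
      (bodyEq (PySem.Str.slice text none (some (-4))))
  · by_cases h5 : EXTENSIONS.contains (PySem.Str.slice text (some (-5)) none) = true
    · -- A strips the 5-character extension ".jpeg"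
      have hmem : (PySem.Str.slice text (some (-5)) none) ∈ EXTENSIONS := by
        simpa [List.contains_iff_mem] using h5
      have hsuf : (PySem.Str.slice text (some (-5)) none).toList <:+ text.toList := by
        rw [slice5_toList]; exact List.drop_suffix _ _
      have hlen : (PySem.Str.slice text (some (-5)) none).toList.length
          = text.toList.length - (text.toList.length - 5) := by
        rw [slice5_toList, List.length_drop]
      have hl5 : (PySem.Str.slice text (some (-5)) none).toList.length = 5 := by
        rcases ext_len _ hmem with h | h
        · -- a 4-character member could only match if text itself has length 4,
          -- but then the -4 slice would already have matched
          exfalso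
          have hn : text.toList.length = 4 := by omega
          have he4 : PySem.Str.slice text (some (-4)) none
              = PySem.Str.slice text (some (-5)) none := by
            apply str_toList_inj
            rw [slice4_toList, slice5_toList, hn]
          exact h4 (by rw [he4]; simpa [List.contains_iff_mem] using hmem)
        · exact h
      have hfind : EXTENSIONS.find? (fun ext => PySem.Str.endswith text ext)
          = some (PySem.Str.slice text (some (-5)) none) := by
        apply find_unique _ _ _ hmem ((endswith_iff text _).mpr hsuf)
        intro x hx hpx
        exact unique_suffix text.toList x _ hx hmem ((endswith_iff text x).mp hpx) hsuf
      have hlenE : (PySem.Str.len (PySem.Str.slice text (some (-5)) none)) = (5 : Int) := by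
        rw [str_len_eq, hl5]; rfl
      unfold uppercase_vowels uppercase_vowels_alt
      rw [if_neg h4, if_pos h5, hfind]
      dsimp only
      rw [hlenE]
      exact congrArg (· ++ PySem.Str.slice text (some (-5)) none)
        (bodyEq (PySem.Str.slice text none (some (-5))))
    · -- no extension matches: B's scan finds none either
      have hfind : EXTENSIONS.find? (fun ext => PySem.Str.endswith text ext) = none := by
        rw [List.find?_eq_none]
        intro x hx hpx
        have hsuf : x.toList <:+ text.toList := (endswith_iff text x).mp hpx
        have hle : x.toList.length ≤ text.toList.length := hsuf.length_le
        rcases ext_len x hx with hl | hl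
        · apply h4
          have hx4 : PySem.Str.slice text (some (-4)) none = x := by
            apply str_toList_inj
            rw [slice4_toList, ← hl]
            exact suffix_drop _ _ hsuf
          rw [hx4]
          simpa [List.contains_iff_mem] using hx
        · apply h5
          have hx5 : PySem.Str.slice text (some (-5)) none = x := by
            apply str_toList_inj
            rw [slice5_toList, ← hl]
            exact suffix_drop _ _ hsuf
          rw [hx5]
          simpa [List.contains_iff_mem] using hx
      unfold uppercase_vowels uppercase_vowels_alt
      rw [if_neg h4, if_neg h5, hfind]
      dsimp only
      rw [bodyEq text]
      apply str_toList_inj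
      simp
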